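-- pv_equiv track=rewrite | github.com/Pradeep-Deep14/Sep-2_24 | 3.py | separate_duplicate_and_unique_elements
-- ===== SOURCE A (Python) =====
-- def separate_duplicate_and_unique_elements(L):
--     seen=set()
--     unique_list=[]
--     duplicate_list=[]
--     for i in L:
--         if i not in seen:
--             unique_list.append(i)
--             seen.add(i)
--         else:
--             duplicate_list.append(i)
--     return unique_list,duplicate_list
-- ===== SOURCE B (Python) =====
-- def separate_duplicate_and_unique_elements(L):
--     unique_list = list(dict.fromkeys(L))
--     first = {}
--     for i, x in enumerate(L):
--         first.setdefault(x, i)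
--     duplicate_list = [x for i, x in enumerate(L) if first[x] != i]
--     return unique_list, duplicate_list
-- ===== Notes on version B (the rewrite author's own statement) =====
-- stated objective: alternative
-- what changed: Instead of one loop branching on a mutable seen-set, B gets the unique list from dict.fromkeys and the duplicates from a declarative filter that compares each element's position against a precomputed first-occurrence index table.
import Mathlib
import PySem

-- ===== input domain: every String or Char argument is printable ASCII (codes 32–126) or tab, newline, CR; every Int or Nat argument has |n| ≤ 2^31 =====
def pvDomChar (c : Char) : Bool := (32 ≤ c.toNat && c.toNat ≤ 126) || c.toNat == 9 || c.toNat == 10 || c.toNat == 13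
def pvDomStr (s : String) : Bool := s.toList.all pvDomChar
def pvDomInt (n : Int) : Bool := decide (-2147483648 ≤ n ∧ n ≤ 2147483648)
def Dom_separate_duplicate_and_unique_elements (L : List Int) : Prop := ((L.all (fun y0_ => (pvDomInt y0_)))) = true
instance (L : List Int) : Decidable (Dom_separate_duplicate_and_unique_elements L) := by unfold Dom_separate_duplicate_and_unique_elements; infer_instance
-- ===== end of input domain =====

-- B replaces A's single seen-set loop by declarative passes: ordered dedup for the
-- uniques and a first-occurrence-index filter for the duplicates (objective: alternative).

-- ===== PORT A =====
-- literal port: one fold over L carrying (seen, unique_list, duplicate_list)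
def separate_duplicate_and_unique_elements (L : List Int) : List Int × List Int :=
  let r := L.foldl
    (fun (st : PySem.Set Int × List Int × List Int) i =>
      if PySem.Set.contains st.1 i = false then
        (PySem.Set.add st.1 i, st.2.1 ++ [i], st.2.2)
      else
        (st.1, st.2.1, st.2.2 ++ [i]))
    (PySem.Set.empty, [], [])
  (r.2.1, r.2.2)

-- ===== PORT B =====
-- list(dict.fromkeys(L)) = PySem.List.dedup; the loop builds the first-occurrence
-- index table with setdefault; the comprehension keeps elements whose index differs
-- from their first occurrence (first[x] always hits: every x of L is a key)
def separate_duplicate_and_unique_elements_alt (L : List Int) : List Int × List Int :=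
  let first := (PySem.List.enumerate L 0).foldl
      (fun (d : PySem.Dict Int Int) p => PySem.Dict.setdefault d p.2 p.1) PySem.Dict.empty
  (PySem.List.dedup L,
   ((PySem.List.enumerate L 0).filter
      (fun p => decide (PySem.Dict.get? first p.2 ≠ some p.1))).map (·.2))

-- ===== PRECONDITION & SPEC =====
def Spec_separate_duplicate_and_unique_elements (L : List Int) (out : List Int × List Int) : Prop := out = separate_duplicate_and_unique_elements_alt L
instance (L : List Int) (out : List Int × List Int) : Decidable (Spec_separate_duplicate_and_unique_elements L out) := by unfold Spec_separate_duplicate_and_unique_elements; infer_instance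

-- ===== CLAIM (what is proved, stated in full; the proofs are below) =====
def Claim_equal_separate_duplicate_and_unique_elements : Prop := ∀ (L : List Int), Dom_separate_duplicate_and_unique_elements L → Spec_separate_duplicate_and_unique_elements L (separate_duplicate_and_unique_elements L)

-- ===== LEMMAS AND PROOFS =====

-- the duplicates A emits when starting from seen-set s
def newDups (s : PySem.Set Int) : List Int → List Int
  | [] => []
  | x :: S => if x ∈ s then x :: newDups s S
              else newDups (PySem.Set.add s x) S

lemma ofList_snoc (P : List Int) (x : Int) :
    PySem.Set.ofList (P ++ [x]) = PySem.Set.add (PySem.Set.ofList P) x := by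
  simp [PySem.Set.ofList_eq_foldl]

lemma a_fold (S : List Int) : ∀ (s : PySem.Set Int) (d : List Int),
    S.foldl
      (fun (st : PySem.Set Int × List Int × List Int) i =>
        if PySem.Set.contains st.1 i = false then
          (PySem.Set.add st.1 i, st.2.1 ++ [i], st.2.2)
        else
          (st.1, st.2.1, st.2.2 ++ [i]))
      (s, s, d)
    = (PySem.Set.update s S, PySem.Set.update s S, d ++ newDups s S) := by
  induction S with
  | nil => intro s d; simp [newDups, PySem.Set.update]
  | cons x S ih =>
    intro s d
    rw [List.foldl_cons]
    by_cases hx : x ∈ s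
    · have hstep : (if (s, s, d).1.contains x = false then
            ((s, s, d).1.add x, (s, s, d).2.1 ++ [x], (s, s, d).2.2)
          else ((s, s, d).1, (s, s, d).2.1, (s, s, d).2.2 ++ [x])) = (s, s, d ++ [x]) := by
        simp [hx]
      rw [hstep, ih s (d ++ [x])]
      have hupd : PySem.Set.update s (x :: S) = PySem.Set.update s S := by
        simp [PySem.Set.update, PySem.Set.add, hx]
      rw [hupd]
      simp [newDups, hx]
    · have hstep : (if (s, s, d).1.contains x = false then
            ((s, s, d).1.add x, (s, s, d).2.1 ++ [x], (s, s, d).2.2)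
          else ((s, s, d).1, (s, s, d).2.1, (s, s, d).2.2 ++ [x])) = (s ++ [x], s ++ [x], d) := by
        simp [PySem.Set.add, hx]
      rw [hstep, ih (s ++ [x]) d]
      have hupd : PySem.Set.update s (x :: S) = PySem.Set.update (s ++ [x]) S := by
        simp [PySem.Set.update, PySem.Set.add, hx]
      rw [hupd]
      simp [newDups, PySem.Set.add, hx]

-- the first-occurrence table of the port of B, named for the proofs
def mkF (L : List Int) : PySem.Dict Int Int :=
  (PySem.List.enumerate L 0).foldl
    (fun (d : PySem.Dict Int Int) p => PySem.Dict.setdefault d p.2 p.1) PySem.Dict.empty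

lemma fold_setdefault_get? (S : List Int) : ∀ (s : Int) (d : PySem.Dict Int Int) (x : Int),
    ((PySem.List.enumerate S s).foldl
        (fun (d : PySem.Dict Int Int) p => PySem.Dict.setdefault d p.2 p.1) d).get? x
    = if d.contains x then d.get? x
      else (PySem.List.index? S x).map (fun k => s + (k : Int)) := by
  induction S with
  | nil =>
    intro s d x
    simp [PySem.Dict.get?_eq_none_iff_contains]
  | cons y S ih =>
    intro s d x
    rw [PySem.List.enumerate_cons, List.foldl_cons, ih]
    by_cases hxy : x = y
    · subst hxy
      by_cases hc : d.contains x = true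
      · obtain ⟨v, hv⟩ : ∃ v, d.get? x = some v := by
          cases hg : d.get? x with
          | none =>
            rw [PySem.Dict.get?_eq_none_iff_contains] at hg
            simp [hc] at hg
          | some v => exact ⟨v, rfl⟩
        simp [hc, PySem.Dict.contains_setdefault, PySem.Dict.get?_setdefault_self, hv]
      · have hcf : d.contains x = false := by simpa using hc
        have hnone : d.get? x = none := (PySem.Dict.get?_eq_none_iff_contains d x).mpr hcf
        rw [PySem.List.index?_cons_self]
        simp [hcf, PySem.Dict.contains_setdefault, PySem.Dict.get?_setdefault_self, hnone]
    · by_cases hc : d.contains x = true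
      · simp [hc, PySem.Dict.contains_setdefault, PySem.Dict.get?_setdefault_of_ne, hxy]
      · have hcf : d.contains x = false := by simpa using hc
        have hyx : y ≠ x := Ne.symm hxy
        rw [PySem.List.index?_cons_of_ne S hyx]
        cases hix : PySem.List.index? S x with
        | none =>
          simp [hix, hcf, hxy, PySem.Dict.contains_setdefault, PySem.Dict.get?_setdefault_of_ne]
        | some k =>
          simp [hix, hcf, hxy, PySem.Dict.contains_setdefault, PySem.Dict.get?_setdefault_of_ne]
          omega

lemma mkF_get? (L : List Int) (x : Int) :
    (mkF L).get? x = (PySem.List.index? L x).map (fun k => (k : Int)) := by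
  rw [mkF, fold_setdefault_get?]
  rw [if_neg (by simp)]
  cases PySem.List.index? L x with
  | none => rfl
  | some k => simp

lemma dups_suffix (S : List Int) : ∀ (P : List Int),
    newDups (PySem.Set.ofList P) S
    = ((PySem.List.enumerate S (P.length : Int)).filter
         (fun p => decide ((PySem.List.index? (P ++ S) p.2).map (fun k => (k : Int)) ≠ some p.1))).map (·.2) := by
  induction S with
  | nil => intro P; simp [newDups]
  | cons x S ih =>
    intro P
    have hrec := ih (P ++ [x])
    have hlen : ((P ++ [x]).length : Int) = (P.length : Int) + 1 := by
      simp
    rw [ofList_snoc, hlen] at hrec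
    have happ : (P ++ [x]) ++ S = P ++ x :: S := by simp
    rw [happ] at hrec
    by_cases hm : x ∈ P
    · have hmem : x ∈ PySem.Set.ofList P := by simp [PySem.Set.mem_ofList, hm]
      have hadd : PySem.Set.add (PySem.Set.ofList P) x = PySem.Set.ofList P := by
        simp [PySem.Set.add, hmem]
      rw [hadd] at hrec
      have hidx : PySem.List.index? (P ++ x :: S) x = PySem.List.index? P x :=
        PySem.List.index?_append_of_mem (x :: S) hm
      obtain ⟨k, hk⟩ : ∃ k, PySem.List.index? P x = some k := by
        cases hix : PySem.List.index? P x with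
        | none =>
          rw [PySem.List.index?_eq_none_iff] at hix
          exact absurd hm hix
        | some k => exact ⟨k, rfl⟩
      obtain ⟨hklt, -⟩ := PySem.List.getElem_of_index?_eq_some hk
      have hkne : (k : Int) ≠ (P.length : Int) := by omega
      rw [show newDups (PySem.Set.ofList P) (x :: S) = x :: newDups (PySem.Set.ofList P) S
            from by simp [newDups, hmem]]
      rw [PySem.List.enumerate_cons, List.filter_cons]
      rw [PySem.List.index?_eq_idxOf?, PySem.List.index?_eq_idxOf?] at hidx
      rw [PySem.List.index?_eq_idxOf?] at hk
      simp [hidx, hk, hkne, hrec]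
    · have hmem : x ∉ PySem.Set.ofList P := by simp [PySem.Set.mem_ofList, hm]
      have hidx : PySem.List.index? (P ++ x :: S) x = some P.length := by
        rw [PySem.List.index?_eq_some_iff]
        exact ⟨P, S, rfl, rfl, hm⟩
      rw [show newDups (PySem.Set.ofList P) (x :: S)
            = newDups (PySem.Set.add (PySem.Set.ofList P) x) S from by simp [newDups, hmem]]
      rw [hrec, PySem.List.enumerate_cons, List.filter_cons]
      rw [PySem.List.index?_eq_idxOf?] at hidx
      simp [hidx]

-- ===== VERDICT (by name: the statement is the Claim_ definition above) =====
theorem separate_duplicate_and_unique_elements_spec : Claim_equal_separate_duplicate_and_unique_elements := by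
  intro L _
  show separate_duplicate_and_unique_elements L = separate_duplicate_and_unique_elements_alt L
  have h0 := a_fold L PySem.Set.empty []
  have hA : separate_duplicate_and_unique_elements L
      = (PySem.Set.update PySem.Set.empty L, newDups PySem.Set.empty L) := by
    have hdef : separate_duplicate_and_unique_elements L
        = ((L.foldl
            (fun (st : PySem.Set Int × List Int × List Int) i =>
              if PySem.Set.contains st.1 i = false then
                (PySem.Set.add st.1 i, st.2.1 ++ [i], st.2.2)
              else
                (st.1, st.2.1, st.2.2 ++ [i]))
            (PySem.Set.empty, PySem.Set.empty, ([] : List Int))).2.1,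
           (L.foldl
            (fun (st : PySem.Set Int × List Int × List Int) i =>
              if PySem.Set.contains st.1 i = false then
                (PySem.Set.add st.1 i, st.2.1 ++ [i], st.2.2)
              else
                (st.1, st.2.1, st.2.2 ++ [i]))
            (PySem.Set.empty, PySem.Set.empty, ([] : List Int))).2.2) := rfl
    rw [hdef, h0]
    simp
  have hB : separate_duplicate_and_unique_elements_alt L
      = (PySem.List.dedup L,
         ((PySem.List.enumerate L 0).filter
            (fun p => decide (PySem.Dict.get? (mkF L) p.2 ≠ some p.1))).map (·.2)) := rfl
  rw [hA, hB]
  rw [List.filter_congr (fun p _ => by rw [mkF_get? L p.2])]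
  rw [Prod.mk.injEq]
  constructor
  · rw [PySem.List.dedup_eq_ofList, PySem.Set.ofList_eq_foldl]
    rfl
  · have hd := dups_suffix L []
    simpa [PySem.Set.empty, show PySem.Set.ofList ([] : List Int) = [] from rfl] using hd
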